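-- pv_equiv track=rewrite | github.com/Nhtoi/Small-Exercises | VowelSum.py | vowelSum
-- ===== SOURCE A (Python) =====
-- def vowelSum(sentece):
--     vowels = "a,e,i,o,u"
--     utf = []
--     dictionary = {}
--     for words in sentece:
--         for c in words:
--             if c in vowels:
--                 dictionary[c] = dictionary.get(c, 0) + 1
--                 c.lower()
--                 utf.append(ord(c) - ord("a"))
--     return len(utf), sum(utf), dictionary
-- ===== SOURCE B (Python) =====
-- def vowelSum(sentece):
--     vowels = "a,e,i,o,u"
--     dictionary = {}
--     for words in sentece:
--         for c in words:
--             if c in vowels: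
--                 dictionary[c] = dictionary.get(c, 0) + 1
--     count = sum(dictionary.values())
--     offset = sum(n * (ord(ch) - ord("a")) for ch, n in dictionary.items())
--     return count, offset, dictionary
-- ===== Notes on version B (the rewrite author's own statement) =====
-- stated objective: alternative
-- what changed: B builds only the count dictionary in the nested pass (no utf list) and derives the count as the sum of the dictionary values and the offset sum as sum of count*(ord(key)-ord('a')) over the at-most-6 dictionary items.
import Mathlib
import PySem

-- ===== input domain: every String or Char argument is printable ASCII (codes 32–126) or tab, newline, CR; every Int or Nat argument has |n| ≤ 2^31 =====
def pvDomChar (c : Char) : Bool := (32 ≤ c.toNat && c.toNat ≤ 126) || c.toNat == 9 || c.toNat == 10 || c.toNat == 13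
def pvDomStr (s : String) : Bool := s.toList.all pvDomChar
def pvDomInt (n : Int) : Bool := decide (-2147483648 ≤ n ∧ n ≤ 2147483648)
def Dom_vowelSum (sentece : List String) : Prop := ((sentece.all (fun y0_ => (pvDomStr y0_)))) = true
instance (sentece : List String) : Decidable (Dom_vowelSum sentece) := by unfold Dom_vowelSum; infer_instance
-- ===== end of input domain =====

-- B builds only the count dictionary in one nested pass and derives count and offset sum from it;
-- same nested iteration and the same `c in "a,e,i,o,u"` test (comma counts, lower() is a no-op in A).

-- ===== PORT A =====
-- 'c in vowels' (substring test on a 1-char needle = char membership); dict key c is a 1-char string.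
def vowelSum (sentece : List String) : Int × Int × (List (String × Int)) :=
  let st : List Int × PySem.Dict String Int :=
    sentece.foldl (fun st words =>
      words.toList.foldl (fun st c =>
        if "a,e,i,o,u".toList.contains c then
          (st.1 ++ [((c.toNat : Int) - 97)],
           st.2.insert (String.ofList [c]) (st.2.getD (String.ofList [c]) 0 + 1))
        else st) st)
      ([], PySem.Dict.empty)
  ((st.1.length : Int), st.1.sum, st.2.items)

-- ===== PORT B =====
-- ord(ch) for the 1-char key ch is ported as the code of its head character (exact: every key is 1 char).
def vowelSum_alt (sentece : List String) : Int × Int × (List (String × Int)) :=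
  let d : PySem.Dict String Int :=
    sentece.foldl (fun d words =>
      words.toList.foldl (fun d c =>
        if "a,e,i,o,u".toList.contains c then
          d.insert (String.ofList [c]) (d.getD (String.ofList [c]) 0 + 1)
        else d) d)
      PySem.Dict.empty
  (d.values.sum,
   (d.items.map (fun kv => kv.2 * (((kv.1.toList.headD ' ').toNat : Int) - 97))).sum,
   d.items)

-- ===== PRECONDITION & SPEC =====
def Spec_vowelSum (sentece : List String) (out : Int × Int × (List (String × Int))) : Prop := out = vowelSum_alt sentece
instance (sentece : List String) (out : Int × Int × (List (String × Int))) : Decidable (Spec_vowelSum sentece out) := by unfold Spec_vowelSum; infer_instance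

-- ===== CLAIM (what is proved, stated in full; the proofs are below) =====
def Claim_equal_vowelSum : Prop := ∀ (sentece : List String), Dom_vowelSum sentece → Spec_vowelSum sentece (vowelSum sentece)

-- ===== LEMMAS AND PROOFS =====

-- the flat list of accepted characters
def pvV (sentece : List String) : List Char :=
  sentece.flatMap (fun w => w.toList.filter (fun c => "a,e,i,o,u".toList.contains c))

-- the dict step on a char
def pvStep (d : PySem.Dict String Int) (c : Char) : PySem.Dict String Int :=
  d.insert (String.ofList [c]) (d.getD (String.ofList [c]) 0 + 1)

-- A's inner loop, one word
theorem pvA_inner (cs : List Char) (u : List Int) (d : PySem.Dict String Int) :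
    cs.foldl (fun st c =>
        if "a,e,i,o,u".toList.contains c then
          (st.1 ++ [((c.toNat : Int) - 97)],
           st.2.insert (String.ofList [c]) (st.2.getD (String.ofList [c]) 0 + 1))
        else st) ((u, d) : List Int × PySem.Dict String Int)
    = (u ++ (cs.filter (fun c => "a,e,i,o,u".toList.contains c)).map (fun c => (c.toNat : Int) - 97),
       (cs.filter (fun c => "a,e,i,o,u".toList.contains c)).foldl pvStep d) := by
  induction cs generalizing u d with
  | nil => simp
  | cons c cs ih =>
    rw [List.foldl_cons, List.filter_cons]
    by_cases h : ("a,e,i,o,u".toList.contains c) = true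
    · rw [if_pos h, if_pos h, ih]
      simp [pvStep]
    · rw [if_neg h, if_neg h]
      exact ih u d

theorem pvA_outer (sentece : List String) (u : List Int) (d : PySem.Dict String Int) :
    sentece.foldl (fun st words =>
      words.toList.foldl (fun st c =>
        if "a,e,i,o,u".toList.contains c then
          (st.1 ++ [((c.toNat : Int) - 97)],
           st.2.insert (String.ofList [c]) (st.2.getD (String.ofList [c]) 0 + 1))
        else st) st) ((u, d) : List Int × PySem.Dict String Int)
    = (u ++ (pvV sentece).map (fun c => (c.toNat : Int) - 97), (pvV sentece).foldl pvStep d) := by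
  induction sentece generalizing u d with
  | nil => simp [pvV]
  | cons w ws ih =>
    rw [List.foldl_cons, pvA_inner, ih]
    simp only [pvV, List.flatMap_cons, List.map_append, List.append_assoc, List.foldl_append]

theorem pvB_inner (cs : List Char) (d : PySem.Dict String Int) :
    cs.foldl (fun d c =>
        if "a,e,i,o,u".toList.contains c then
          d.insert (String.ofList [c]) (d.getD (String.ofList [c]) 0 + 1)
        else d) d
    = (cs.filter (fun c => "a,e,i,o,u".toList.contains c)).foldl pvStep d := by
  induction cs generalizing d with
  | nil => rfl
  | cons c cs ih =>
    rw [List.foldl_cons, List.filter_cons]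
    by_cases h : ("a,e,i,o,u".toList.contains c) = true
    · rw [if_pos h, if_pos h, ih]
      rfl
    · rw [if_neg h, if_neg h]
      exact ih d

theorem pvB_outer (sentece : List String) (d : PySem.Dict String Int) :
    sentece.foldl (fun d words =>
      words.toList.foldl (fun d c =>
        if "a,e,i,o,u".toList.contains c then
          d.insert (String.ofList [c]) (d.getD (String.ofList [c]) 0 + 1)
        else d) d) d
    = (pvV sentece).foldl pvStep d := by
  induction sentece generalizing d with
  | nil => rfl
  | cons w ws ih =>
    rw [List.foldl_cons, pvB_inner, ih]
    simp only [pvV, List.flatMap_cons, List.foldl_append]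

-- the insert-getD-add-one fold is Counter over the 1-char keys
theorem pvFold_eq_counter (l : List Char) :
    l.foldl pvStep PySem.Dict.empty
      = PySem.Dict.counter (l.map (fun c => String.ofList [c])) := by
  rw [← PySem.Dict.foldl_insert_getD_add_one_eq_counter, List.foldl_map]
  rfl

-- Σ_{x ∈ dedup l} count x * g x = Σ_{x ∈ l} g x
theorem pvSum_count_dedup_mul {α : Type} [DecidableEq α] (g : α → Int) (l : List α) :
    ((l.dedup.map fun x => (l.count x : Int) * g x).sum) = (l.map g).sum := by
  induction l with
  | nil => simp
  | cons a as ih =>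
    by_cases ha : a ∈ as
    · rw [List.dedup_cons_of_mem ha]
      have hsplit : ((as.dedup.map fun x => ((a :: as).count x : Int) * g x).sum)
          = ((as.dedup.map fun x => (as.count x : Int) * g x).sum)
            + ((as.dedup.map fun x => (if x = a then (1:Int) else 0) * g x).sum) := by
        rw [← List.sum_map_add]
        congr 1
        apply List.map_congr_left
        intro x _
        simp only [List.count_cons]
        by_cases hx : x = a
        · simp [hx]; push_cast; ring
        · simp [hx]
          exact Or.inl fun h => hx h.symm
      have hone : ((as.dedup.map fun x => (if x = a then (1:Int) else 0) * g x).sum) = g a := by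
        have hz := List.sum_map_eq_nsmul_single (l := as.dedup) a
          (fun x => (if x = a then (1:Int) else 0) * g x)
        rw [hz (by intro x hx _; rw [if_neg hx, zero_mul]), List.count_dedup]
        simp [ha]
      rw [hsplit, hone, ih]
      simp only [List.map_cons, List.sum_cons]
      ring
    · rw [List.dedup_cons_of_notMem ha]
      simp only [List.map_cons, List.sum_cons]
      have hcount : (((a :: as).count a : ℕ) : Int) = 1 := by
        simp [List.count_cons_self, List.count_eq_zero.2 ha]
      have hrest : ((as.dedup.map fun x => ((a :: as).count x : Int) * g x).sum)
          = ((as.dedup.map fun x => (as.count x : Int) * g x).sum) := by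
        congr 1
        apply List.map_congr_left
        intro x hx
        have haxf : (a == x) = false := by
          simp only [beq_eq_false_iff_ne, ne_eq]
          intro h; subst h; exact ha (List.mem_dedup.mp hx)
        simp [List.count_cons, haxf]
      rw [hcount, hrest, ih]
      ring
-- ofList keeps first occurrences, Mathlib's dedup keeps others: same set, so a permutation
theorem pvOfList_perm_dedup {α : Type} [DecidableEq α] (l : List α) :
    (PySem.Set.ofList l : List α).Perm l.dedup := by
  refine (List.perm_ext_iff_of_nodup (PySem.Set.nodup_ofList l) l.nodup_dedup).2 ?_
  intro a
  rw [PySem.Set.mem_ofList, List.mem_dedup]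

theorem pvValues_counter_sum {α : Type} [DecidableEq α] (l : List α) :
    ((PySem.Dict.counter l).values.sum) = (l.length : Int) := by
  have hv : (PySem.Dict.counter l).values
      = (PySem.Set.ofList l).map (fun k => (l.count k : Int)) := by
    show ((PySem.Dict.counter l).items.map Prod.snd) = _
    rw [PySem.Dict.items_counter]
    simp [Function.comp]
  rw [hv, ((pvOfList_perm_dedup l).map (fun k => (l.count k : Int))).sum_eq]
  calc ((l.dedup.map fun x => (l.count x : Int)).sum)
      = (((l.dedup.map fun x => l.count x).map (Nat.cast : ℕ → Int)).sum) := by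
        rw [List.map_map]; rfl
    _ = (((l.dedup.map fun x => l.count x).sum : ℕ) : Int) := (Nat.cast_list_sum _).symm
    _ = (l.length : Int) := by rw [List.sum_map_count_dedup_eq_length]

theorem pvItems_counter_sum {α : Type} [DecidableEq α] (g : α → Int) (l : List α) :
    (((PySem.Dict.counter l).items.map (fun kv => kv.2 * g kv.1)).sum) = (l.map g).sum := by
  rw [PySem.Dict.items_counter, List.map_map]
  have hc : ((fun kv : α × Int => kv.2 * g kv.1) ∘ fun k => (k, (l.count k : Int)))
      = fun x => (l.count x : Int) * g x := by funext x; rfl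
  rw [hc, ((pvOfList_perm_dedup l).map (fun x => (l.count x : Int) * g x)).sum_eq,
    pvSum_count_dedup_mul]

-- ===== VERDICT (by name: the statement is the Claim_ definition above) =====
theorem vowelSum_spec : Claim_equal_vowelSum := by
  intro sentece _
  show vowelSum sentece = vowelSum_alt sentece
  simp only [vowelSum, vowelSum_alt]
  rw [pvA_outer, pvB_outer, pvFold_eq_counter]
  refine congrArg₂ Prod.mk ?_ (congrArg₂ Prod.mk ?_ rfl)
  · rw [pvValues_counter_sum]
    simp
  · show (List.map (fun c => (c.toNat : Int) - 97) (pvV sentece)).sum = _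
    rw [pvItems_counter_sum (fun s => ((s.toList.headD ' ').toNat : Int) - 97)
      (List.map (fun c => String.ofList [c]) (pvV sentece)), List.map_map]
    exact congrArg List.sum (List.map_congr_left fun c _ => by simp)
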